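-- pv_equiv track=rewrite | github.com/kajigor/fl-2021-hse-win | solution/parser/parser_yacc.py | operator_checking
-- ===== SOURCE A (Python) =====
-- def operator_checking(s):
--     result = ""
--     is_skip = False
--     for i in range(0, len(s)):
--         if is_skip:
--             is_skip = False
--             continue
--         if s[i] == '>':
--             result += "&gt;"
--         elif s[i] == '<':
--             result += "&lt;"
--         elif s[i] == '&':
--             result += "&amp;"
--         elif s[i] == ' ':
--             continue
--         elif i < len(s) - 1 and (s[i] + s[i + 1]) == "o_":
--             is_skip = True
--             continue
--         else:
--             result += s[i]
--     return result
-- ===== SOURCE B (Python) =====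
-- def operator_checking(s):
--     t = s.replace("o_", "").replace(" ", "")
--     return t.replace("&", "&amp;").replace("<", "&lt;").replace(">", "&gt;")
-- ===== Notes on version B (the rewrite author's own statement) =====
-- stated objective: faster
-- what changed: Replaced the index-based stateful character scan (skip flag, lookahead) by three bulk passes with str.replace: remove the non-overlapping pair substring, remove spaces, then apply the HTML escapes by chained replaces ('&' first).
import Mathlib
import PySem

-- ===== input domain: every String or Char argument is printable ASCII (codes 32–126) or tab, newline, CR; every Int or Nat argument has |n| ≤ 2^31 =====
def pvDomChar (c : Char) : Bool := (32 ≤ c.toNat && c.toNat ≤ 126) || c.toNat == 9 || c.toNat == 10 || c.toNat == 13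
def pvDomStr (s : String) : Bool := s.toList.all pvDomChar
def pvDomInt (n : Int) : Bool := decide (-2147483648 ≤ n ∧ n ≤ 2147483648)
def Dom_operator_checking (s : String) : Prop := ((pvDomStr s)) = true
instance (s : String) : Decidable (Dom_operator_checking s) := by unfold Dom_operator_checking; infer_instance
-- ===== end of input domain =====

-- B replaces A's stateful index scan (skip flag + lookahead) by bulk replace passes: drop the skip-pairs, drop spaces, then escape '&','<','>'; measurably faster (C-level replace vs per-char loop).

-- ===== PORT A =====
-- the loop body of A: state (result, is_skip), index i into cs
def ocStep (cs : List Char) (st : List Char × Bool) (i : Int) : List Char × Bool :=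
  let result := st.1
  let is_skip := st.2
  if is_skip then (result, false)
  else
    let c := PySem.List.pyGetD cs i ' '
    if c = '>' then (result ++ "&gt;".toList, is_skip)
    else if c = '<' then (result ++ "&lt;".toList, is_skip)
    else if c = '&' then (result ++ "&amp;".toList, is_skip)
    else if c = ' ' then (result, is_skip)
    else if i < (cs.length : Int) - 1 ∧ [c, PySem.List.pyGetD cs (i + 1) ' '] = ['o', '_'] then
      (result, true)
    else (result ++ [c], is_skip)

def operator_checking (s : String) : String :=
  let cs := s.toList
  String.ofList ((PySem.List.pyRange 0 (cs.length : Int) 1).foldl (ocStep cs) ([], false)).1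

-- ===== PORT B =====
def operator_checking_alt (s : String) : String :=
  let t := PySem.Str.replace s "o_" ""
  let t := PySem.Str.replace t " " ""
  PySem.Str.replace (PySem.Str.replace (PySem.Str.replace t "&" "&amp;") "<" "&lt;") ">" "&gt;"

-- ===== PRECONDITION & SPEC =====
def Spec_operator_checking (s : String) (out : String) : Prop := out = operator_checking_alt s
instance (s : String) (out : String) : Decidable (Spec_operator_checking s out) := by unfold Spec_operator_checking; infer_instance

-- ===== CLAIM (what is proved, stated in full; the proofs are below) =====
def Claim_equal_operator_checking : Prop := ∀ (s : String), Dom_operator_checking s → Spec_operator_checking s (operator_checking s)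

-- ===== LEMMAS AND PROOFS =====

-- left-to-right non-overlapping removal of "o_" pairs
def rmO : List Char → List Char
  | [] => []
  | [c] => [c]
  | c :: d :: t => if c = 'o' ∧ d = '_' then rmO t else c :: rmO (d :: t)

-- single-character replacement as a flatMap
def sub1 (c0 : Char) (new : List Char) (l : List Char) : List Char :=
  l.flatMap (fun c => if c = c0 then new else [c])

-- per-character effect of A on a pair-free string: escape or drop a space
def escC (c : Char) : List Char :=
  if c = '>' then "&gt;".toList
  else if c = '<' then "&lt;".toList
  else if c = '&' then "&amp;".toList
  else if c = ' ' then []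
  else [c]

theorem go_single (c0 : Char) (new : List Char) :
    ∀ fuel (l acc : List Char), l.length ≤ fuel →
      PySem.Chars.replace.go [c0] new fuel l acc = acc.reverse ++ sub1 c0 new l := by
  intro fuel
  induction fuel with
  | zero =>
    intro l acc h
    have : l = [] := List.eq_nil_of_length_eq_zero (Nat.le_zero.mp h)
    subst this
    rw [PySem.Chars.replace.go.eq_def]; simp [sub1]
  | succ n ih =>
    intro l acc h
    cases l with
    | nil => rw [PySem.Chars.replace.go.eq_def]; simp [sub1]
    | cons c t =>
      rw [PySem.Chars.replace.go.eq_def]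
      simp only [List.isPrefixOf, Bool.and_true]
      by_cases hc : c0 = c
      · subst hc
        simp only [beq_self_eq_true, if_pos]
        rw [ih _ _ (by simpa using h)]
        simp [sub1]
      · rw [if_neg (by simp [hc])]
        rw [ih _ _ (by simpa using h)]
        simp [sub1, if_neg (fun (h' : c = c0) => hc h'.symm)]

theorem rmO_cons_ne (c : Char) (l : List Char) (h : ¬ (c = 'o' ∧ l.head? = some '_')) :
    rmO (c :: l) = c :: rmO l := by
  cases l with
  | nil => simp [rmO]
  | cons d t =>
    simp only [rmO]
    rw [if_neg]
    intro ⟨h1, h2⟩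
    exact h ⟨h1, by simp [h2]⟩

theorem go_pair :
    ∀ fuel (l acc : List Char), l.length ≤ fuel →
      PySem.Chars.replace.go ['o', '_'] [] fuel l acc = acc.reverse ++ rmO l := by
  intro fuel
  induction fuel using Nat.strong_induction_on with
  | _ fuel ih =>
    intro l acc h
    match fuel, l with
    | 0, l =>
      have : l = [] := List.eq_nil_of_length_eq_zero (Nat.le_zero.mp h)
      subst this
      rw [PySem.Chars.replace.go.eq_def]; simp [rmO]
    | n + 1, [] => rw [PySem.Chars.replace.go.eq_def]; simp [rmO]
    | n + 1, [c] =>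
      rw [PySem.Chars.replace.go.eq_def]
      simp only [List.isPrefixOf]
      rw [if_neg (by simp)]
      rw [ih n (by omega) [] (c :: acc) (by simp)]
      simp [rmO]
    | n + 1, c :: d :: t =>
      rw [PySem.Chars.replace.go.eq_def]
      simp only [List.isPrefixOf, Bool.and_true]
      by_cases hp : c = 'o' ∧ d = '_'
      · obtain ⟨h1, h2⟩ := hp; subst h1; subst h2
        simp only [beq_self_eq_true, Bool.and_self, if_pos]
        simp only [List.length_cons, List.drop_succ_cons, List.length_nil, List.drop_zero,
          List.reverse_nil, List.nil_append]
        rw [ih n (by omega) t _ (by simp at h ⊢; omega)]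
        simp [rmO]
      · rw [if_neg (by
          simp only [Bool.and_eq_true, beq_iff_eq]
          intro ⟨h1, h2⟩; exact hp ⟨h1.symm, h2.symm⟩)]
        rw [ih n (by omega) (d :: t) (c :: acc) (by simp at h ⊢; omega)]
        rw [rmO_cons_ne c (d :: t) (by
          intro ⟨h1, h2⟩; simp at h2; exact hp ⟨h1, h2⟩)]
        simp

theorem replace_single (l : List Char) (c0 : Char) (new : List Char) :
    PySem.Chars.replace l [c0] new = sub1 c0 new l := by
  rw [PySem.Chars.replace]
  simp only [List.isEmpty_cons, if_neg Bool.false_ne_true]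
  rw [go_single c0 new l.length l [] (le_refl _)]
  simp

theorem replace_pair (l : List Char) :
    PySem.Chars.replace l ['o', '_'] [] = rmO l := by
  rw [PySem.Chars.replace]
  simp only [List.isEmpty_cons, if_neg Bool.false_ne_true]
  rw [go_pair l.length l [] (le_refl _)]
  simp

-- composing the four single-character passes gives the per-character map escC
theorem sub1_chain (l : List Char) :
    sub1 '>' "&gt;".toList (sub1 '<' "&lt;".toList (sub1 '&' "&amp;".toList
      (sub1 ' ' [] l))) = l.flatMap escC := by
  induction l with
  | nil => rfl
  | cons c t ih =>
    simp only [sub1, List.flatMap_cons, List.flatMap_append] at ih ⊢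
    rw [ih]
    congr 1
    by_cases h1 : c = ' '
    · subst h1; decide
    by_cases h2 : c = '&'
    · subst h2; decide
    by_cases h3 : c = '<'
    · subst h3; decide
    by_cases h4 : c = '>'
    · subst h4; decide
    simp [escC, h1, h2, h3, h4]

theorem pyGetD_of_drop (cs suf : List Char) (c : Char) (i : Int) (h0 : 0 ≤ i)
    (hdrop : cs.drop i.toNat = c :: suf) : PySem.List.pyGetD cs i ' ' = c := by
  have hi : i.toNat < cs.length := by
    by_contra hge
    rw [List.drop_eq_nil_of_le (by omega)] at hdrop
    simp at hdrop
  have hi2 : i < (cs.length : Int) := by omega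
  rw [PySem.List.pyGetD_eq_getElem cs ' ' h0 hi2]
  have h1 : cs[i.toNat]? = some c := by
    have h2 := (List.getElem?_drop (xs := cs) (i := i.toNat) (j := 0)).symm
    simpa [hdrop] using h2
  exact (List.getElem_eq_iff hi).mpr h1

theorem drop_toNat_add_one (cs suf : List Char) (c : Char) (i : Int) (_h0 : 0 ≤ i)
    (hdrop : cs.drop i.toNat = c :: suf) : cs.drop (i + 1).toNat = suf := by
  have ht : (i + 1).toNat = i.toNat + 1 := by omega
  rw [ht, ← List.drop_drop, hdrop]
  simp

theorem length_of_drop (cs suf : List Char) (i : Int) (h0 : 0 ≤ i)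
    (hdrop : cs.drop i.toNat = suf) : cs.length = i.toNat + suf.length ∨ (suf = [] ∧ cs.length ≤ i.toNat) := by
  rcases Nat.lt_or_ge i.toNat cs.length with h | h
  · left
    have := congrArg List.length hdrop
    simp [List.length_drop] at this
    omega
  · right
    constructor
    · rw [← hdrop, List.drop_eq_nil_of_le h]
    · exact h

theorem operator_checking_A_eq (cs : List Char) :
    ∀ (suf : List Char) (i : Int) (acc : List Char), 0 ≤ i → i ≤ (cs.length : Int) →
      cs.drop i.toNat = suf →
      (PySem.List.pyRange i (cs.length : Int) 1).foldl (ocStep cs) (acc, false)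
        = (acc ++ (rmO suf).flatMap escC, false) := by
  intro suf
  induction suf using rmO.induct with
  | case1 =>
    intro i acc h0 hle hdrop
    have hlen := length_of_drop cs [] i h0 hdrop
    have hi : i = (cs.length : Int) := by
      rcases hlen with h | ⟨_, h⟩
      · simp at h; omega
      · omega
    rw [hi, PySem.List.pyRange_one_eq_nil (le_refl _)]
    simp [rmO]
  | case2 c =>
    intro i acc h0 hle hdrop
    have hlen := length_of_drop cs [c] i h0 hdrop
    have hi : i.toNat + 1 = cs.length := by
      rcases hlen with h | ⟨h, _⟩
      · simp at h; omega
      · simp at h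
    have hc := pyGetD_of_drop cs [] c i h0 hdrop
    rw [PySem.List.pyRange_one_cons (by omega)]
    rw [List.foldl_cons, PySem.List.pyRange_one_eq_nil (by omega), List.foldl_nil]
    simp only [ocStep, hc, Bool.false_eq_true, if_false]
    have hnp : ¬ (i < (cs.length : Int) - 1 ∧
        [c, PySem.List.pyGetD cs (i + 1) ' '] = ['o', '_']) := by
      intro ⟨h1, _⟩; omega
    by_cases h1 : c = '>'
    · subst h1; simp [rmO, escC]
    by_cases h2 : c = '<'
    · subst h2; simp [rmO, escC]
    by_cases h3 : c = '&'
    · subst h3; simp [rmO, escC, h1]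
    by_cases h4 : c = ' '
    · subst h4; simp [rmO, escC, h1, h2]
    · simp [rmO, escC, h1, h2, h3, h4]
      intro h
      exact absurd h (by omega)
  | case3 c d t hp ih =>
    intro i acc h0 hle hdrop
    obtain ⟨hc', hd'⟩ := hp
    subst hc'; subst hd'
    have hlen := length_of_drop cs ('o' :: '_' :: t) i h0 hdrop
    have hL : cs.length = i.toNat + (t.length + 2) := by
      rcases hlen with h | ⟨h, _⟩
      · simp at h; omega
      · simp at h
    have hc := pyGetD_of_drop cs ('_' :: t) 'o' i h0 hdrop
    have hdrop1 := drop_toNat_add_one cs ('_' :: t) 'o' i h0 hdrop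
    have hd := pyGetD_of_drop cs t '_' (i + 1) (by omega) hdrop1
    have hdrop2 := drop_toNat_add_one cs t '_' (i + 1) (by omega) hdrop1
    rw [PySem.List.pyRange_one_cons (by omega), List.foldl_cons]
    have hstep1 : ocStep cs (acc, false) i = (acc, true) := by
      simp [ocStep, hc, hd, (show i < (cs.length : Int) - 1 by omega)]
    rw [hstep1, PySem.List.pyRange_one_cons (by omega : i + 1 < (cs.length : Int)),
      List.foldl_cons]
    have hstep2 : ocStep cs (acc, true) (i + 1) = (acc, false) := by
      simp [ocStep]
    rw [hstep2]
    have : i + 1 + 1 = i + 2 := by ring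
    rw [this, ih (i + 2) acc (by omega) (by omega)
      (by rw [show (i + 2 : Int) = (i + 1) + 1 by ring]
          exact drop_toNat_add_one cs t '_' (i + 1) (by omega) hdrop1)]
    simp [rmO]
  | case4 c d t hp ih =>
    intro i acc h0 hle hdrop
    have hlen := length_of_drop cs (c :: d :: t) i h0 hdrop
    have hL : cs.length = i.toNat + (t.length + 2) := by
      rcases hlen with h | ⟨h, _⟩
      · simp at h; omega
      · simp at h
    have hc := pyGetD_of_drop cs (d :: t) c i h0 hdrop
    have hdrop1 := drop_toNat_add_one cs (d :: t) c i h0 hdrop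
    have hd := pyGetD_of_drop cs t d (i + 1) (by omega) hdrop1
    rw [PySem.List.pyRange_one_cons (by omega), List.foldl_cons]
    have hstep : ocStep cs (acc, false) i = (acc ++ escC c, false) := by
      simp only [ocStep, Bool.false_eq_true, if_false]
      have hnp : ¬ (i < (cs.length : Int) - 1 ∧
          [PySem.List.pyGetD cs i ' ', PySem.List.pyGetD cs (i + 1) ' '] = ['o', '_']) := by
        rw [hc, hd]
        intro ⟨_, hpair⟩
        simp at hpair
        exact hp ⟨hpair.1, hpair.2⟩
      by_cases h1 : c = '>'
      · subst h1; simp [hc, escC]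
      by_cases h2 : c = '<'
      · subst h2; simp [hc, escC]
      by_cases h3 : c = '&'
      · subst h3; simp [hc, escC, h1]
      by_cases h4 : c = ' '
      · subst h4; simp [hc, escC, h1, h2]
      · simp [hc, escC, h1, h2, h3, h4]
        intro _ hco hd'
        rw [hd] at hd'
        exact hp ⟨hco, hd'⟩
    rw [hstep, ih (i + 1) (acc ++ escC c) (by omega) (by omega) hdrop1]
    rw [rmO_cons_ne c (d :: t) (by intro ⟨h1, h2⟩; simp at h2; exact hp ⟨h1, h2⟩)]
    simp

-- ===== VERDICT (by name: the statement is the Claim_ definition above) =====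
theorem operator_checking_spec : Claim_equal_operator_checking := by
  intro s _
  unfold Spec_operator_checking operator_checking operator_checking_alt
  simp only [PySem.Str.replace, String.toList_ofList]
  rw [show ("o_".toList) = ['o', '_'] from rfl,
    show (" ".toList) = [' '] from rfl, show ("&".toList) = ['&'] from rfl,
    show ("<".toList) = ['<'] from rfl, show (">".toList) = ['>'] from rfl,
    show ("".toList) = ([] : List Char) from rfl]
  rw [replace_pair, replace_single, replace_single, replace_single, replace_single]
  rw [sub1_chain]
  rw [operator_checking_A_eq s.toList s.toList 0 [] (by omega) (by omega) (by simp)]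
  simp
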